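-- pv_equiv track=rewrite | github.com/Happy-ryan/PS | 백준/Gold/22945. 팀 빌딩/팀 빌딩.py | solution
-- ===== SOURCE A (Python) =====
-- def solution(n, Xs):
--     # 정렬하면 안된다.
--     capa = 0
--     l = 0
--     r = n - 1
--     # for l in range(n):
--     #     while l + 1 < r and Xs[l] > Xs[r]:
--     #         r -= 1
--     while l < r:
--         capa = max(capa, (r - l - 1) * min(Xs[l], Xs[r]))
--
--         if Xs[l] < Xs[r]:
--             l += 1
--         else:
--             r -= 1
--
--     return capa
-- ===== SOURCE B (Python) =====
-- def solution(n, Xs):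
--     capa = 0
--     for i in range(n):
--         for j in range(i + 1, n):
--             v = (j - i - 1) * min(Xs[i], Xs[j])
--             if v > capa:
--                 capa = v
--     return capa
-- ===== Notes on version B (the rewrite author's own statement) =====
-- stated objective: alternative
-- what changed: Replaced the two-pointer inward scan with an exhaustive double loop over all index pairs (i,j), taking the maximum of (j-i-1)*min(Xs[i],Xs[j]); equal by the classic domination argument for the moved pointer.
import Mathlib
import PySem

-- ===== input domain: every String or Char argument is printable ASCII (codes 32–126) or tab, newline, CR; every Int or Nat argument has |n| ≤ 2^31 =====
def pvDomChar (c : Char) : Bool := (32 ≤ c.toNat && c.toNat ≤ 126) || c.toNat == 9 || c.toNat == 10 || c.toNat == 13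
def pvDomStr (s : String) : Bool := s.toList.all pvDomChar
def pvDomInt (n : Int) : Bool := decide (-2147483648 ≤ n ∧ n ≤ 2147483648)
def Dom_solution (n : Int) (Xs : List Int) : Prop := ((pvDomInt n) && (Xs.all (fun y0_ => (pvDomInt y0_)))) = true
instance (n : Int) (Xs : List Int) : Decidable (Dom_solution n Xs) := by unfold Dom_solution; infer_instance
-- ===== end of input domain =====

-- B replaces A's two-pointer inward scan by an exhaustive double loop over all index pairs
-- (an alternative of similar size; not faster).

-- Xs[i] under Pre_ (index always in range there)
def pvX (Xs : List Int) (i : Int) : Int := PySem.List.pyGetD Xs i 0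

-- the candidate value of a pair: (j - i - 1) * min(Xs[i], Xs[j])
def pvF (Xs : List Int) (i j : Int) : Int := (j - i - 1) * min (pvX Xs i) (pvX Xs j)

-- ===== PORT A =====
def pvALoop (Xs : List Int) (l r capa : Int) : Int :=
  if l < r then
    if pvX Xs l < pvX Xs r then
      pvALoop Xs (l + 1) r (max capa (pvF Xs l r))
    else
      pvALoop Xs l (r - 1) (max capa (pvF Xs l r))
  else capa
termination_by (r - l).toNat
decreasing_by all_goals omega

def solution (n : Int) (Xs : List Int) : Int := pvALoop Xs 0 (n - 1) 0

-- ===== PORT B =====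
def solution_alt (n : Int) (Xs : List Int) : Int :=
  (PySem.List.pyRange 0 n 1).foldl (fun capa i =>
    (PySem.List.pyRange (i + 1) n 1).foldl (fun c j =>
      if pvF Xs i j > c then pvF Xs i j else c) capa) 0

-- ===== PRECONDITION & SPEC =====
-- Pre_ excludes exactly the inputs where Python A (and B) raise IndexError: n ≥ 2 with fewer than n elements.
def Pre_solution (n : Int) (Xs : List Int) : Prop := 2 ≤ n → n ≤ (Xs.length : Int)
instance (n : Int) (Xs : List Int) : Decidable (Pre_solution n Xs) := by unfold Pre_solution; infer_instance

def pvWitness_solution : Int × List Int := (5, [2, 7, 1, 1, 9])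

def Spec_solution (n : Int) (Xs : List Int) (out : Int) : Prop := out = solution_alt n Xs
instance (n : Int) (Xs : List Int) (out : Int) : Decidable (Spec_solution n Xs out) := by unfold Spec_solution; infer_instance

-- ===== CLAIM (what is proved, stated in full; the proofs are below) =====
def Claim_equal_solution : Prop := ∀ (n : Int) (Xs : List Int), Dom_solution n Xs → Pre_solution n Xs → Spec_solution n Xs (solution n Xs)

-- ===== LEMMAS AND PROOFS =====

-- "out is the maximum of capa and all pair values pvF i j with l ≤ i < j ≤ r"
def pvIsMax (Xs : List Int) (l r capa out : Int) : Prop :=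
  capa ≤ out ∧ (∀ i j : Int, l ≤ i → i < j → j ≤ r → pvF Xs i j ≤ out) ∧
  (out = capa ∨ ∃ i j : Int, l ≤ i ∧ i < j ∧ j ≤ r ∧ out = pvF Xs i j)

theorem pvIsMax_unique (Xs : List Int) (l r capa o1 o2 : Int)
    (h1 : pvIsMax Xs l r capa o1) (h2 : pvIsMax Xs l r capa o2) : o1 = o2 := by
  obtain ⟨hc1, hp1, he1⟩ := h1
  obtain ⟨hc2, hp2, he2⟩ := h2
  apply le_antisymm
  · rcases he1 with h | ⟨i, j, hi, hij, hjr, h⟩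
    · exact h ▸ hc2
    · exact h ▸ hp2 i j hi hij hjr
  · rcases he2 with h | ⟨i, j, hi, hij, hjr, h⟩
    · exact h ▸ hc1
    · exact h ▸ hp1 i j hi hij hjr

-- the domination inequality behind the two-pointer argument
theorem pvKeyIneq (m a d D capa : Int) (hm : m ≤ a) (hd : 0 ≤ d) (hdD : d ≤ D) (hc : 0 ≤ capa) :
    d * m ≤ max capa (D * a) := by
  by_cases ha : 0 ≤ a
  · have h1 : d * m ≤ d * a := mul_le_mul_of_nonneg_left hm hd
    have h2 : d * a ≤ D * a := mul_le_mul_of_nonneg_right hdD ha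
    exact le_trans (le_trans h1 h2) (le_max_right _ _)
  · have h1 : d * m ≤ 0 := mul_nonpos_iff.mpr (Or.inl ⟨hd, by omega⟩)
    exact le_trans (le_trans h1 hc) (le_max_left _ _)

theorem pvALoop_isMax (Xs : List Int) :
    ∀ (fuel : Nat) (l r capa : Int), (r - l).toNat ≤ fuel → 0 ≤ capa →
      pvIsMax Xs l r capa (pvALoop Xs l r capa) := by
  intro fuel
  induction fuel with
  | zero =>
    intro l r capa hf hc
    have hrl : ¬ l < r := by omega
    rw [pvALoop, if_neg hrl]
    exact ⟨le_refl _, fun i j hi hij hjr => absurd hjr (by omega), Or.inl rfl⟩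
  | succ fuel ih =>
    intro l r capa hf hc
    by_cases hlr : l < r
    · rw [pvALoop, if_pos hlr]
      have hc' : 0 ≤ max capa (pvF Xs l r) := le_trans hc (le_max_left _ _)
      by_cases hbr : pvX Xs l < pvX Xs r
      · rw [if_pos hbr]
        obtain ⟨h1, h2, h3⟩ := ih (l + 1) r (max capa (pvF Xs l r)) (by omega) hc'
        refine ⟨le_trans (le_max_left _ _) h1, ?_, ?_⟩
        · intro i j hi hij hjr
          by_cases hil : l + 1 ≤ i
          · exact h2 i j hil hij hjr
          · have hieq : i = l := by omega
            subst hieq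
            by_cases hjreq : j = r
            · subst hjreq
              exact le_trans (le_max_right _ _) h1
            · have key := pvKeyIneq (min (pvX Xs i) (pvX Xs j)) (pvX Xs i)
                (j - i - 1) (r - i - 1) capa (min_le_left _ _) (by omega) (by omega) hc
              have hmin : min (pvX Xs i) (pvX Xs r) = pvX Xs i := min_eq_left hbr.le
              have : pvF Xs i j ≤ max capa (pvF Xs i r) := by
                simpa [pvF, hmin] using key
              exact le_trans this h1
        · rcases h3 with h | ⟨i, j, hi, hij, hjr, h⟩
          · rcases max_choice capa (pvF Xs l r) with hm | hm
            · exact Or.inl (h.trans hm)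
            · exact Or.inr ⟨l, r, le_refl _, hlr, le_refl _, h.trans hm⟩
          · exact Or.inr ⟨i, j, by omega, hij, hjr, h⟩
      · rw [if_neg hbr]
        have hbr' : pvX Xs r ≤ pvX Xs l := le_of_not_gt hbr
        obtain ⟨h1, h2, h3⟩ := ih l (r - 1) (max capa (pvF Xs l r)) (by omega) hc'
        refine ⟨le_trans (le_max_left _ _) h1, ?_, ?_⟩
        · intro i j hi hij hjr
          by_cases hjr' : j ≤ r - 1
          · exact h2 i j hi hij hjr'
          · have hjeq : j = r := by omega
            subst hjeq
            by_cases hieq : i = l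
            · subst hieq
              exact le_trans (le_max_right _ _) h1
            · have key := pvKeyIneq (min (pvX Xs i) (pvX Xs j)) (pvX Xs j)
                (j - i - 1) (j - l - 1) capa (min_le_right _ _) (by omega) (by omega) hc
              have hmin : min (pvX Xs l) (pvX Xs j) = pvX Xs j := min_eq_right hbr'
              have : pvF Xs i j ≤ max capa (pvF Xs l j) := by
                simpa [pvF, hmin] using key
              exact le_trans this h1
        · rcases h3 with h | ⟨i, j, hi, hij, hjr, h⟩
          · rcases max_choice capa (pvF Xs l r) with hm | hm
            · exact Or.inl (h.trans hm)
            · exact Or.inr ⟨l, r, le_refl _, hlr, le_refl _, h.trans hm⟩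
          · exact Or.inr ⟨i, j, hi, hij, by omega, h⟩
    · rw [pvALoop, if_neg hlr]
      exact ⟨le_refl _, fun i j hi hij hjr => absurd hjr (by omega), Or.inl rfl⟩

-- inner loop of B: maximum over j in range(a, n) of pvF i j, folded with an if
theorem pvBInner_spec (Xs : List Int) (i n : Int) :
    ∀ (fuel : Nat) (a c : Int), (n - a).toNat ≤ fuel →
      c ≤ ((PySem.List.pyRange a n 1).foldl (fun c j =>
            if pvF Xs i j > c then pvF Xs i j else c) c) ∧
      (∀ j : Int, a ≤ j → j < n →
        pvF Xs i j ≤ ((PySem.List.pyRange a n 1).foldl (fun c j =>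
            if pvF Xs i j > c then pvF Xs i j else c) c)) ∧
      (((PySem.List.pyRange a n 1).foldl (fun c j =>
            if pvF Xs i j > c then pvF Xs i j else c) c) = c ∨
        ∃ j : Int, a ≤ j ∧ j < n ∧
          ((PySem.List.pyRange a n 1).foldl (fun c j =>
            if pvF Xs i j > c then pvF Xs i j else c) c) = pvF Xs i j) := by
  intro fuel
  induction fuel with
  | zero =>
    intro a c hf
    have hna : n ≤ a := by omega
    rw [PySem.List.pyRange_one_eq_nil hna]
    exact ⟨le_refl _, fun j hj hjn => absurd hjn (by omega), Or.inl rfl⟩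
  | succ fuel ih =>
    intro a c hf
    by_cases han : a < n
    · rw [PySem.List.pyRange_one_cons han, List.foldl_cons]
      have hstep : c ≤ (if pvF Xs i a > c then pvF Xs i a else c) ∧
          pvF Xs i a ≤ (if pvF Xs i a > c then pvF Xs i a else c) ∧
          ((if pvF Xs i a > c then pvF Xs i a else c) = c ∨
            (if pvF Xs i a > c then pvF Xs i a else c) = pvF Xs i a) := by
        split_ifs with h
        · exact ⟨le_of_lt h, le_refl _, Or.inr rfl⟩
        · exact ⟨le_refl _, le_of_not_gt h, Or.inl rfl⟩
      obtain ⟨h1, h2, h3⟩ := ih (a + 1) (if pvF Xs i a > c then pvF Xs i a else c) (by omega)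
      refine ⟨le_trans hstep.1 h1, ?_, ?_⟩
      · intro j hj hjn
        by_cases hja : a + 1 ≤ j
        · exact h2 j hja hjn
        · have : j = a := by omega
          subst this
          exact le_trans hstep.2.1 h1
      · rcases h3 with h | ⟨j, hj, hjn, h⟩
        · rcases hstep.2.2 with hs | hs
          · exact Or.inl (h.trans hs)
          · exact Or.inr ⟨a, le_refl _, han, h.trans hs⟩
        · exact Or.inr ⟨j, by omega, hjn, h⟩
    · rw [PySem.List.pyRange_one_eq_nil (by omega)]
      exact ⟨le_refl _, fun j hj hjn => absurd hjn (by omega), Or.inl rfl⟩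

-- outer loop of B
theorem pvBOuter_spec (Xs : List Int) (n : Int) :
    ∀ (fuel : Nat) (b c : Int), (n - b).toNat ≤ fuel → 0 ≤ c →
      pvIsMax Xs b (n - 1) c ((PySem.List.pyRange b n 1).foldl (fun capa i =>
        (PySem.List.pyRange (i + 1) n 1).foldl (fun c j =>
          if pvF Xs i j > c then pvF Xs i j else c) capa) c) := by
  intro fuel
  induction fuel with
  | zero =>
    intro b c hf hc
    rw [PySem.List.pyRange_one_eq_nil (by omega)]
    exact ⟨le_refl _, fun i j hi hij hjr => absurd hjr (by omega), Or.inl rfl⟩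
  | succ fuel ih =>
    intro b c hf hc
    by_cases hbn : b < n
    · rw [PySem.List.pyRange_one_cons hbn, List.foldl_cons]
      obtain ⟨hi1, hi2, hi3⟩ := pvBInner_spec Xs b n ((n - (b + 1)).toNat) (b + 1) c (le_refl _)
      obtain ⟨h1, h2, h3⟩ := ih (b + 1)
        ((PySem.List.pyRange (b + 1) n 1).foldl (fun c j =>
          if pvF Xs b j > c then pvF Xs b j else c) c) (by omega) (le_trans hc hi1)
      refine ⟨le_trans hi1 h1, ?_, ?_⟩
      · intro i j hi hij hjr
        by_cases hib : b + 1 ≤ i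
        · exact h2 i j hib hij hjr
        · have : i = b := by omega
          subst this
          exact le_trans (hi2 j (by omega) (by omega)) h1
      · rcases h3 with h | ⟨i, j, hi, hij, hjr, h⟩
        · rcases hi3 with hs | ⟨j, hj, hjn, hs⟩
          · exact Or.inl (h.trans hs)
          · exact Or.inr ⟨b, j, le_refl _, by omega, by omega, h.trans hs⟩
        · exact Or.inr ⟨i, j, by omega, hij, hjr, h⟩
    · rw [PySem.List.pyRange_one_eq_nil (by omega)]
      exact ⟨le_refl _, fun i j hi hij hjr => absurd hjr (by omega), Or.inl rfl⟩

-- ===== VERDICT (by name: the statement is the Claim_ definition above) =====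
theorem solution_spec : Claim_equal_solution := by
  intro n Xs _ _
  unfold Spec_solution solution solution_alt
  exact pvIsMax_unique Xs 0 (n - 1) 0 _ _
    (pvALoop_isMax Xs ((n - 1 - 0).toNat) 0 (n - 1) 0 (le_refl _) (le_refl _))
    (pvBOuter_spec Xs n ((n - 0).toNat) 0 0 (le_refl _) (le_refl _))
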